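-- pv_equiv track=rewrite | github.com/D10f/python-scripts | simple_subs_cipher.py | get_reduced_map
-- ===== SOURCE A (Python) =====
-- import copy
--
-- LETTERS='ABCDEFGHIJKLMNOPQRSTUVWXYZ'
--
-- def get_reduced_map(cipher_map):
--     _cipher_map = copy.deepcopy(cipher_map)
--
--     # Letters with only one option are considered solved
--     solved_letters = [x[0] for x in _cipher_map.values() if len(x) == 1]
--
--     for s in solved_letters:
--         for letter in LETTERS:
--             # Remove already solved letters
--             if len(_cipher_map[letter]) > 1 and s in _cipher_map[letter]:
--                 _cipher_map[letter].remove(s)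
--                 # If list length goes down to 1, a new letter is solved
--                 if len(_cipher_map[letter]) == 1:
--                     solved_letters.append(_cipher_map[letter][0])
--
--     return _cipher_map
-- ===== SOURCE B (Python) =====
-- import copy
--
-- LETTERS = 'ABCDEFGHIJKLMNOPQRSTUVWXYZ'
--
--
-- def get_reduced_map(cipher_map):
--     result = copy.deepcopy(cipher_map)
--
--     # index each candidate value by the cipher letters whose list contains it,
--     # so eliminating a solved value only visits the lists that can hold it
--     occurs = {}
--     for letter in LETTERS:
--         for v in set(result.get(letter, [])):
--             occurs.setdefault(v, []).append(letter)
--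
--     solved = [v[0] for v in result.values() if len(v) == 1]
--     for s in solved:
--         for letter in occurs.get(s, []):
--             lst = result[letter]
--             if len(lst) > 1 and s in lst:
--                 lst.remove(s)
--                 if len(lst) == 1:
--                     solved.append(lst[0])
--     return result
-- ===== Notes on version B (the rewrite author's own statement) =====
-- stated objective: alternative
-- what changed: Builds a value-to-letters occurrence index once up front, so the per-solved-letter inner scan over all 26 letters (with a membership test on each list) disappears: each solved value visits only the letters whose list can contain it.
import Mathlib
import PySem

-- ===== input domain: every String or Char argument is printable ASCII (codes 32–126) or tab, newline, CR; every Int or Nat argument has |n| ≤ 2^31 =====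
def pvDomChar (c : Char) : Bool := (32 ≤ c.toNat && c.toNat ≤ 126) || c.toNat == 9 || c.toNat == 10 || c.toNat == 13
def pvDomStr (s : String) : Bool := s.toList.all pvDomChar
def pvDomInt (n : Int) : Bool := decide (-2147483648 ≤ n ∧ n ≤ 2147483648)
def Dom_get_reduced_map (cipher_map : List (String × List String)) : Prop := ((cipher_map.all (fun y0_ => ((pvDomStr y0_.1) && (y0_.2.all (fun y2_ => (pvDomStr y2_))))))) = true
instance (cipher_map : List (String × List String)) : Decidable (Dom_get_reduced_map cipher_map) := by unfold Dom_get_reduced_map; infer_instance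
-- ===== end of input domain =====

-- B builds, once, an index from each candidate value to the letters whose list contains it,
-- so A's inner scan over all 26 letters per solved value disappears ("alternative").
-- Neither program mutates its argument (both deepcopy first); equivalence is about the return value.

-- the module constant LETTERS, shared by both Pythons
def pvLetters : List String :=
  ["A","B","C","D","E","F","G","H","I","J","K","L","M","N","O","P","Q","R","S","T","U","V","W","X","Y","Z"]

abbrev GMap := List (String × List String)

-- Python-dict primitives on the association-list encoding (unique keys inside Pre_):
-- first-match lookup d[k] and first-match in-place value replacement.
def pvGet (m : GMap) (k : String) : Option (List String) :=
  match m with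
  | [] => none
  | (k', v) :: t => if k' = k then some v else pvGet t k

def pvSet (m : GMap) (k : String) (v : List String) : GMap :=
  match m with
  | [] => []
  | (k', w) :: t => if k' = k then (k', v) :: t else (k', w) :: pvSet t k v

-- total number of candidates held in the map (termination measure of both ports)
def pvSize (m : GMap) : Nat := (m.map (fun kv => kv.2.length)).sum

-- ===== PORT A =====
-- one iteration of A's inner 'for letter in LETTERS' body, for the solved letter s;
-- state: (the map, the tail of discoveries appended to solved_letters)
def grmInner (s : String) (acc : GMap × List String) (c : String) : GMap × List String :=
  match pvGet acc.1 c with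
  | none => acc       -- Python raises KeyError here; such inputs are outside Pre_
  | some l =>
    if l.length > 1 ∧ s ∈ l then
      let l' := l.erase s     -- list.remove(s) with s ∈ l
      if l'.length = 1 then (pvSet acc.1 c l', acc.2 ++ [l'.headI])
      else (pvSet acc.1 c l', acc.2)
    else acc

-- the whole inner 'for letter in LETTERS' loop for one solved letter s
def grmRound (s : String) (m : GMap) : GMap × List String :=
  pvLetters.foldl (grmInner s) (m, [])

-- A's 'for s in solved_letters' loop over the list it is itself appending to,
-- modelled as a queue of the not-yet-processed solved letters
def grmQueue (fuel : Nat) (m : GMap) (queue : List String) : GMap :=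
  match queue, fuel with
  | [], _ => m
  | _ :: _, 0 => m        -- fuel guard only: the fuel below is enough for the loop to finish
  | s :: rest, fuel + 1 => grmQueue fuel (grmRound s m).1 (rest ++ (grmRound s m).2)

def get_reduced_map (cipher_map : List (String × List String)) : List (String × List String) :=
  let m := cipher_map          -- copy.deepcopy
  -- solved_letters = [x[0] for x in _cipher_map.values() if len(x) == 1]
  let solved := m.filterMap (fun kv => if kv.2.length = 1 then some kv.2.headI else none)
  grmQueue (pvSize m + solved.length) m solved

-- ===== PORT B =====
-- occurs.setdefault(v, []).append(letter): append c to the entry of v, creating it at the end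
def idxAdd (d : GMap) (v c : String) : GMap :=
  match d with
  | [] => [(v, [c])]
  | (k, l) :: t => if k = v then (k, l ++ [c]) :: t else (k, l) :: idxAdd t v c

-- result.get(letter, []) / occurs.get(s, [])
def pvGetD (m : GMap) (k : String) : List String := (pvGet m k).getD []

-- the two nested index-building loops: for letter in LETTERS: for v in set(result.get(letter, [])): …
def buildIdx (m : GMap) : GMap :=
  pvLetters.foldl
    (fun d letter => (PySem.Set.ofList (pvGetD m letter)).foldl (fun d v => idxAdd d v letter) d)
    []

-- body of B's inner 'for letter in occurs.get(s, [])' loop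
def grmInnerB (s : String) (acc : GMap × List String) (c : String) : GMap × List String :=
  match pvGet acc.1 c with
  | none => acc       -- unreachable: c comes from the index, so the key is present
  | some lst =>
    if lst.length > 1 ∧ s ∈ lst then
      let l' := lst.erase s
      (pvSet acc.1 c l', if l'.length = 1 then acc.2 ++ [l'.headI] else acc.2)
    else acc

-- B's queue loop, the inner iteration running over the index entry of s
def grmQueueB (idx : GMap) (fuel : Nat) (m : GMap) (queue : List String) : GMap :=
  match queue, fuel with
  | [], _ => m
  | _ :: _, 0 => m        -- fuel guard only, as in port A
  | s :: rest, fuel + 1 =>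
    grmQueueB idx fuel ((pvGetD idx s).foldl (grmInnerB s) (m, [])).1
      (rest ++ ((pvGetD idx s).foldl (grmInnerB s) (m, [])).2)

def get_reduced_map_alt (cipher_map : List (String × List String)) : List (String × List String) :=
  let result := cipher_map     -- copy.deepcopy
  let occurs := buildIdx result
  -- solved = [v[0] for v in result.values() if len(v) == 1]
  let solved := result.filterMap (fun kv => if kv.2.length = 1 then some kv.2.headI else none)
  grmQueueB occurs (pvSize result + solved.length) result solved

-- ===== PRECONDITION & SPEC =====
-- Pre_ excludes (a) association lists with duplicate keys, which the Python dict argument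
-- cannot carry (the encoding's first-match lookup cannot represent Python's last-wins dict),
-- and (b) maps that have some single-candidate list but lack one of the 26 letter keys,
-- on which A raises KeyError.
def Pre_get_reduced_map (cipher_map : List (String × List String)) : Prop :=
  (cipher_map.map Prod.fst).Nodup ∧
    ((∀ c ∈ pvLetters, c ∈ cipher_map.map Prod.fst) ∨ (∀ kv ∈ cipher_map, kv.2.length ≠ 1))
instance (cipher_map : List (String × List String)) : Decidable (Pre_get_reduced_map cipher_map) := by
  unfold Pre_get_reduced_map; infer_instance

def pvWitness_get_reduced_map : (List (String × List String)) :=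
  [("A", ["B", "C"]), ("B", ["C", "D"]), ("!", ["B", "D"])]

def Spec_get_reduced_map (cipher_map : List (String × List String)) (out : List (String × List String)) : Prop := out = get_reduced_map_alt cipher_map
instance (cipher_map : List (String × List String)) (out : List (String × List String)) : Decidable (Spec_get_reduced_map cipher_map out) := by unfold Spec_get_reduced_map; infer_instance

-- ===== CLAIM (what is proved, stated in full; the proofs are below) =====
def Claim_equal_get_reduced_map : Prop := ∀ (cipher_map : List (String × List String)), Dom_get_reduced_map cipher_map → Pre_get_reduced_map cipher_map → Spec_get_reduced_map cipher_map (get_reduced_map cipher_map)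

-- ===== LEMMAS AND PROOFS =====

theorem grmInnerB_eq (s : String) (acc : GMap × List String) (c : String) :
    grmInnerB s acc c = grmInner s acc c := by
  unfold grmInnerB grmInner
  cases h : pvGet acc.1 c with
  | none => rfl
  | some l =>
    simp only
    by_cases hg : l.length > 1 ∧ s ∈ l
    · rw [if_pos hg, if_pos hg]
      by_cases h1 : (l.erase s).length = 1
      · rw [if_pos h1, if_pos h1]
      · rw [if_neg h1, if_neg h1]
    · rw [if_neg hg, if_neg hg]

-- pvGet / pvSet facts
theorem pvGet_pvSet_self {m : GMap} {c : String} {l : List String} (v : List String)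
    (h : pvGet m c = some l) : pvGet (pvSet m c v) c = some v := by
  induction m with
  | nil => simp [pvGet] at h
  | cons kv t ih =>
    obtain ⟨k', w⟩ := kv
    by_cases hk : k' = c
    · simp [pvSet, pvGet, hk]
    · simp [pvGet, hk] at h
      simp [pvSet, pvGet, hk, ih h]

theorem pvGet_pvSet_ne {m : GMap} {c c' : String} (v : List String) (h : c' ≠ c) :
    pvGet (pvSet m c v) c' = pvGet m c' := by
  induction m with
  | nil => rfl
  | cons kv t ih =>
    obtain ⟨k', w⟩ := kv
    by_cases hk : k' = c
    · subst hk
      have hk2 : k' ≠ c' := fun hh => h hh.symm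
      simp [pvSet, pvGet, hk2]
    · by_cases hk2 : k' = c'
      · subst hk2
        simp [pvSet, pvGet, hk]
      · simp [pvSet, pvGet, hk, hk2, ih]

-- the invariant: every current candidate list is a (pointwise) subset of its initial list
def SubM (m0 m : GMap) : Prop :=
  ∀ c l, pvGet m c = some l → ∃ l0, pvGet m0 c = some l0 ∧ l ⊆ l0

theorem Sub_refl (m : GMap) : SubM m m := fun _ l h => ⟨l, h, fun _ hx => hx⟩

theorem Sub_pvSet {m0 m : GMap} {c : String} {l v : List String} (hs : SubM m0 m)
    (h : pvGet m c = some l) (hv : v ⊆ l) : SubM m0 (pvSet m c v) := by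
  intro c' l' h'
  by_cases hc : c' = c
  · subst hc
    rw [pvGet_pvSet_self v h] at h'
    obtain rfl : v = l' := Option.some.inj h'
    obtain ⟨l0, h0, hsub⟩ := hs c' l h
    exact ⟨l0, h0, fun x hx => hsub (hv hx)⟩
  · rw [pvGet_pvSet_ne v hc] at h'
    exact hs c' l' h'

theorem grmInner_Sub {m0 : GMap} {acc : GMap × List String} (s c : String)
    (hs : SubM m0 acc.1) : SubM m0 (grmInner s acc c).1 := by
  unfold grmInner
  cases h : pvGet acc.1 c with
  | none => exact hs
  | some l =>
    simp only
    split
    · split <;> exact Sub_pvSet hs h (List.erase_subset)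
    · exact hs

-- when the INITIAL list at c does not contain s, A's inner body is a no-op at c
theorem grmInner_skip {m0 : GMap} {acc : GMap × List String} {s c : String}
    (hs : SubM m0 acc.1) (hns : s ∉ pvGetD m0 c) : grmInner s acc c = acc := by
  unfold grmInner
  cases h : pvGet acc.1 c with
  | none => rfl
  | some l =>
    obtain ⟨l0, h0, hsub⟩ := hs c l h
    have : s ∉ l := fun hx => hns (by simp [pvGetD, h0]; exact hsub hx)
    simp [this]

-- A's scan over all of cs equals B's scan over the hits only
theorem fold_filter_eq (s : String) (m0 : GMap) :
    ∀ (cs : List String) (acc : GMap × List String), SubM m0 acc.1 →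
      cs.foldl (grmInner s) acc =
        (cs.filter (fun c => decide (s ∈ pvGetD m0 c))).foldl (grmInnerB s) acc := by
  intro cs
  induction cs with
  | nil => intro acc _; rfl
  | cons c cs ih =>
    intro acc hs
    by_cases hc : s ∈ pvGetD m0 c
    · rw [List.filter_cons_of_pos (by simpa using hc)]
      simp only [List.foldl_cons, grmInnerB_eq]
      exact ih (grmInner s acc c) (grmInner_Sub s c hs)
    · rw [List.filter_cons_of_neg (by simpa using hc)]
      simp only [List.foldl_cons, grmInner_skip hs hc]
      exact ih acc hs

theorem fold_Sub (s : String) (m0 : GMap) :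
    ∀ (cs : List String) (acc : GMap × List String), SubM m0 acc.1 →
      SubM m0 (cs.foldl (grmInner s) acc).1 := by
  intro cs
  induction cs with
  | nil => intro acc hs; exact hs
  | cons c cs ih =>
    intro acc hs
    exact ih (grmInner s acc c) (grmInner_Sub s c hs)

-- characterisation of the index: occurs.get(s, []) lists, in LETTERS order,
-- exactly the letters whose initial list contains s
theorem pvGetD_idxAdd (d : GMap) (v c s : String) :
    pvGetD (idxAdd d v c) s = if s = v then pvGetD d s ++ [c] else pvGetD d s := by
  induction d with
  | nil =>
    by_cases hs : s = v
    · subst hs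
      simp [idxAdd, pvGetD, pvGet]
    · simp [idxAdd, pvGetD, pvGet, hs, Ne.symm hs]
  | cons kv t ih =>
    obtain ⟨k, l⟩ := kv
    by_cases hk : k = v
    · subst hk
      by_cases hs : s = k
      · subst hs
        simp [idxAdd, pvGetD, pvGet]
      · simp [idxAdd, pvGetD, pvGet, hs, Ne.symm hs]
    · by_cases hs : k = s
      · subst hs
        simp [idxAdd, pvGetD, pvGet, hk]
      · simp only [idxAdd, if_neg hk]
        simp only [pvGetD, pvGet, if_neg hs] at ih ⊢
        exact ih

theorem pvGetD_foldl_idxAdd (c s : String) :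
    ∀ (vs : List String) (d : GMap), vs.Nodup →
      pvGetD (vs.foldl (fun d v => idxAdd d v c) d) s =
        pvGetD d s ++ (if s ∈ vs then [c] else []) := by
  intro vs
  induction vs with
  | nil => intro d _; simp
  | cons v vs ih =>
    intro d hnd
    simp only [List.foldl_cons]
    rw [ih (idxAdd d v c) (List.nodup_cons.mp hnd).2, pvGetD_idxAdd]
    by_cases hv : s = v
    · subst hv
      have : s ∉ vs := (List.nodup_cons.mp hnd).1
      simp [this]
    · simp [hv, List.mem_cons]

theorem pvGetD_buildIdx_fold (m0 : GMap) (s : String) :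
    ∀ (ls : List String) (d : GMap),
      pvGetD (ls.foldl
          (fun d letter =>
            (PySem.Set.ofList (pvGetD m0 letter)).foldl (fun d v => idxAdd d v letter) d) d) s =
        pvGetD d s ++ ls.filter (fun c => decide (s ∈ pvGetD m0 c)) := by
  intro ls
  induction ls with
  | nil => intro d; simp
  | cons c ls ih =>
    intro d
    simp only [List.foldl_cons]
    rw [ih, pvGetD_foldl_idxAdd c s (PySem.Set.ofList (pvGetD m0 c)) d
          (PySem.Set.nodup_ofList _)]
    by_cases hc : s ∈ pvGetD m0 c
    · rw [List.filter_cons_of_pos (by simpa using hc)]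
      simp [PySem.Set.mem_ofList, hc, List.append_assoc]
    · rw [List.filter_cons_of_neg (by simpa using hc)]
      simp [PySem.Set.mem_ofList, hc]

theorem pvGetD_buildIdx (m0 : GMap) (s : String) :
    pvGetD (buildIdx m0) s = pvLetters.filter (fun c => decide (s ∈ pvGetD m0 c)) := by
  unfold buildIdx
  rw [pvGetD_buildIdx_fold m0 s pvLetters []]
  simp [pvGetD, pvGet]

-- the two queue loops agree fuel-for-fuel, given the subset invariant
-- against the map the index was built from
theorem grmQueue_eq_grmQueueB (m0 : GMap) :
    ∀ (fuel : Nat) (m : GMap) (q : List String), SubM m0 m →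
      grmQueue fuel m q = grmQueueB (buildIdx m0) fuel m q := by
  intro fuel
  induction fuel with
  | zero =>
    intro m q _
    cases q <;> rfl
  | succ fuel ih =>
    intro m q hs
    cases q with
    | nil => rfl
    | cons s rest =>
      have hround : grmRound s m = (pvGetD (buildIdx m0) s).foldl (grmInnerB s) (m, []) := by
        unfold grmRound
        rw [fold_filter_eq s m0 pvLetters (m, []) hs, pvGetD_buildIdx]
      show grmQueue fuel (grmRound s m).1 (rest ++ (grmRound s m).2) =
        grmQueueB (buildIdx m0) fuel ((pvGetD (buildIdx m0) s).foldl (grmInnerB s) (m, [])).1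
          (rest ++ ((pvGetD (buildIdx m0) s).foldl (grmInnerB s) (m, [])).2)
      rw [← hround]
      exact ih (grmRound s m).1 _ (fold_Sub s m0 pvLetters (m, []) hs)

-- ===== VERDICT (by name: the statement is the Claim_ definition above) =====
theorem get_reduced_map_spec : Claim_equal_get_reduced_map := by
  intro m _ _
  unfold Spec_get_reduced_map
  exact grmQueue_eq_grmQueueB m _ m _ (Sub_refl m)
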